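-- pv_equiv track=rewrite | github.com/MostAwesomeDude/bb-gauge | interval.py | splitLabel
-- ===== SOURCE A (Python) =====
-- from collections import deque
--
-- def splitLabel(s):
--     pieces = deque(s.split())
--     l = []; r = []; ll = 0; lr = 0
--     while pieces:
--         if ll < lr:
--             p = pieces.popleft()
--             l.append(p)
--             ll += len(p) + 1
--         else:
--             p = pieces.pop()
--             r.append(p)
--             lr += len(p) + 1
--     r.reverse()
--     return " ".join(l), " ".join(r)
-- ===== SOURCE B (Python) =====
-- def splitLabel(s):
--     words = s.split()
--     total = sum(len(w) + 1 for w in words)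
--     best_k = 0
--     best = abs(-total)
--     p = 0
--     for i, w in enumerate(words):
--         p += len(w) + 1
--         d = abs(2 * p - total)
--         if d < best:
--             best = d
--             best_k = i + 1
--     return " ".join(words[:best_k]), " ".join(words[best_k:])
-- ===== Notes on version B (the rewrite author's own statement) =====
-- stated objective: alternative
-- what changed: Replaces the inward greedy two-pointer deque loop with a single left-to-right prefix-sum scan that picks the split index k minimizing |2*P_k - T| (strict < so the smallest k wins ties) and slices the word list there.
import Mathlib
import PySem

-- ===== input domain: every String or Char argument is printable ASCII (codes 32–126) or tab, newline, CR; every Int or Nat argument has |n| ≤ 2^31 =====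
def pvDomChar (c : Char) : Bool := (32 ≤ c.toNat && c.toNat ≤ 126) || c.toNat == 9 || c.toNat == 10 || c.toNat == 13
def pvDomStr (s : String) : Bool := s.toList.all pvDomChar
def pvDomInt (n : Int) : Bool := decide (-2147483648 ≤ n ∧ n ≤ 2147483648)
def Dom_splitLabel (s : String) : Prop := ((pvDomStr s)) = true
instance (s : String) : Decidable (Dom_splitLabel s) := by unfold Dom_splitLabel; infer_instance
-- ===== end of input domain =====

-- B replaces A's inward greedy two-pointer deque loop with a single prefix-sum scan picking the
-- split index k minimizing |2*P_k - T| (strict <, smallest k wins ties); alternative decomposition, same cost.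

-- ===== PORT A =====
-- greedy loop over the deque: state (pieces, l, r, ll, lr)
def pvLoopA : List String → List String → List String → Int → Int → List String × List String
  | [], l, r, _, _ => (l, r)
  | p :: rest, l, r, ll, lr =>
    if ll < lr then
      pvLoopA rest (l ++ [p]) r (ll + PySem.Str.len p + 1) lr
    else
      pvLoopA (p :: rest).dropLast l (r ++ [(p :: rest).getLast (by simp)]) ll
        (lr + PySem.Str.len ((p :: rest).getLast (by simp)) + 1)
  termination_by pieces _ _ _ _ => pieces.length
  decreasing_by all_goals simp [List.length_dropLast]

def splitLabel (s : String) : String × String :=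
  let pieces := PySem.Str.split₀ s
  let lr := pvLoopA pieces [] [] 0 0
  (PySem.Str.join " " lr.1, PySem.Str.join " " lr.2.reverse)

-- ===== PORT B =====
def splitLabel_alt (s : String) : String × String :=
  let words := PySem.Str.split₀ s
  let total := (words.map (fun w => PySem.Str.len w + 1)).sum
  let st := (PySem.List.enumerate words 0).foldl
    (fun (st : Int × Int × Int) iw =>
      let p := st.1 + PySem.Str.len iw.2 + 1
      let d := |2 * p - total|
      if d < st.2.1 then (p, d, iw.1 + 1) else (p, st.2.1, st.2.2))
    (0, |(-total : Int)|, 0)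
  (PySem.Str.join " " (PySem.List.slice words none (some st.2.2)),
   PySem.Str.join " " (PySem.List.slice words (some st.2.2) none))

-- ===== PRECONDITION & SPEC =====
def Spec_splitLabel (s : String) (out : String × String) : Prop := out = splitLabel_alt s
instance (s : String) (out : String × String) : Decidable (Spec_splitLabel s out) := by unfold Spec_splitLabel; infer_instance

-- ===== CLAIM (what is proved, stated in full; the proofs are below) =====
def Claim_equal_splitLabel : Prop := ∀ (s : String), Dom_splitLabel s → Spec_splitLabel s (splitLabel s)

-- ===== LEMMAS AND PROOFS =====

-- weight of a word list
def pvW (ws : List String) : Int := (ws.map (fun w => PySem.Str.len w + 1)).sum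

-- abstract greedy: how many words A takes on the left
def pvG : List String → Int → Int → Nat
  | [], _, _ => 0
  | w :: rest, ll, lr =>
    if ll < lr then pvG rest (ll + PySem.Str.len w + 1) lr + 1
    else pvG (w :: rest).dropLast ll (lr + PySem.Str.len ((w :: rest).getLast (by simp)) + 1)
  termination_by ws _ _ => ws.length
  decreasing_by all_goals simp [List.length_dropLast]

-- abstract scan step: state (p, best, bk, i)
def pvStep (T : Int) (st : Int × Int × Int × Int) (w : String) : Int × Int × Int × Int :=
  let p := st.1 + PySem.Str.len w + 1
  let d := |2 * p - T|
  if d < st.2.1 then (p, d, st.2.2.2 + 1, st.2.2.2 + 1) else (p, st.2.1, st.2.2.1, st.2.2.2 + 1)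

def pvScan (ws : List String) (T p best bk i : Int) : Int × Int × Int × Int :=
  ws.foldl (pvStep T) (p, best, bk, i)

theorem pvScan_cons (ws : List String) (w : String) (T p best bk i : Int) :
    pvScan (w :: ws) T p best bk i =
      if |2 * (p + PySem.Str.len w + 1) - T| < best
      then pvScan ws T (p + PySem.Str.len w + 1) (|2 * (p + PySem.Str.len w + 1) - T|) (i + 1) (i + 1)
      else pvScan ws T (p + PySem.Str.len w + 1) best bk (i + 1) := by
  simp only [pvScan, List.foldl_cons, pvStep]
  split <;> rfl

theorem pvScan_append_singleton (ws : List String) (w : String) (T p best bk i : Int) :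
    pvScan (ws ++ [w]) T p best bk i = pvStep T (pvScan ws T p best bk i) w := by
  simp [pvScan, List.foldl_append]

theorem pvLen_nonneg (w : String) : 0 ≤ PySem.Str.len w := by
  simp [PySem.Str.len_eq]

theorem pvW_cons (w : String) (ws : List String) :
    pvW (w :: ws) = PySem.Str.len w + 1 + pvW ws := by
  simp [pvW]

theorem pvW_append_singleton (ws : List String) (w : String) :
    pvW (ws ++ [w]) = pvW ws + (PySem.Str.len w + 1) := by
  simp [pvW]

theorem pvW_nonneg (ws : List String) : 0 ≤ pvW ws := by
  induction ws with
  | nil => simp [pvW]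
  | cons w ws ih => rw [pvW_cons]; have := pvLen_nonneg w; omega

-- B's fold over enumerate equals pvScan (projections)
theorem pvFoldB_eq_scan (ws : List String) (T : Int) (n : Int) (p best bk : Int) :
    (PySem.List.enumerate ws n).foldl
      (fun (st : Int × Int × Int) iw =>
        if |2 * (st.1 + PySem.Str.len iw.2 + 1) - T| < st.2.1 then
          (st.1 + PySem.Str.len iw.2 + 1, |2 * (st.1 + PySem.Str.len iw.2 + 1) - T|, iw.1 + 1)
        else (st.1 + PySem.Str.len iw.2 + 1, st.2.1, st.2.2))
      (p, best, bk)
    = ((pvScan ws T p best bk n).1, (pvScan ws T p best bk n).2.1, (pvScan ws T p best bk n).2.2.1) := by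
  induction ws generalizing n p best bk with
  | nil => simp [PySem.List.enumerate, pvScan]
  | cons w ws ih =>
    rw [show PySem.List.enumerate (w :: ws) n = (n, w) :: PySem.List.enumerate ws (n + 1) by
      simp [PySem.List.enumerate]]
    simp only [List.foldl_cons, pvScan, pvStep]
    split
    · exact ih (n + 1) (p + PySem.Str.len w + 1) (|2 * (p + PySem.Str.len w + 1) - T|) (n + 1)
    · exact ih (n + 1) (p + PySem.Str.len w + 1) best bk

-- pvScan state facts
theorem pvScan_p (ws : List String) (T p best bk i : Int) :
    (pvScan ws T p best bk i).1 = p + pvW ws := by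
  induction ws generalizing p best bk i with
  | nil => simp [pvScan, pvW]
  | cons w ws ih =>
    simp only [pvScan, List.foldl_cons, pvStep, pvW_cons]
    split
    · rw [show ws.foldl (pvStep T) _ = pvScan ws T (p + PySem.Str.len w + 1) _ _ _ from rfl, ih]; ring
    · rw [show ws.foldl (pvStep T) _ = pvScan ws T (p + PySem.Str.len w + 1) _ _ _ from rfl, ih]; ring

theorem pvScan_best_le (ws : List String) (T p best bk i : Int)
    (h : best ≤ |2 * p - T|) :
    (pvScan ws T p best bk i).2.1 ≤ |2 * (p + pvW ws) - T| := by
  induction ws generalizing p best bk i with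
  | nil => simpa [pvScan, pvW] using h
  | cons w ws ih =>
    simp only [pvScan, List.foldl_cons, pvStep, pvW_cons]
    split
    · rename_i hlt
      have := ih (p + PySem.Str.len w + 1) (|2 * (p + PySem.Str.len w + 1) - T|)
        (i + 1) (i + 1) le_rfl
      simpa [pvScan, add_assoc] using this
    · rename_i hge
      have := ih (p + PySem.Str.len w + 1) best bk (i + 1) (by omega)
      simpa [pvScan, add_assoc] using this

theorem pvScan_shift (ws : List String) (T p best bk i c : Int) :
    (pvScan ws T p best (bk + c) (i + c)).2.2.1 = (pvScan ws T p best bk i).2.2.1 + c := by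
  induction ws generalizing p best bk i with
  | nil => simp [pvScan]
  | cons w ws ih =>
    simp only [pvScan, List.foldl_cons, pvStep]
    split
    · have := ih (p + PySem.Str.len w + 1) (|2 * (p + PySem.Str.len w + 1) - T|) (i + 1) (i + 1)
      rw [show i + c + 1 = i + 1 + c by ring]
      simpa [pvScan] using this
    · have := ih (p + PySem.Str.len w + 1) best bk (i + 1)
      rw [show i + c + 1 = i + 1 + c by ring]
      simpa [pvScan] using this

-- MAIN: greedy = first-argmin scan
theorem pvMain (ws : List String) (ll lr : Int) (hll : 0 ≤ ll) (hlr : 0 ≤ lr) :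
    (pvScan ws (ll + lr + pvW ws) ll (|2 * ll - (ll + lr + pvW ws)|) 0 0).2.2.1
      = (pvG ws ll lr : Int) := by
  induction ws, ll, lr using pvG.induct with
  | case1 ll lr => simp [pvScan, pvG]
  | case2 w rest ll lr hlt ih =>
    have hw : 0 ≤ PySem.Str.len w := pvLen_nonneg w
    have hWr : 0 ≤ pvW rest := pvW_nonneg rest
    have hd : |2 * (ll + PySem.Str.len w + 1) - (ll + lr + pvW (w :: rest))|
        < |2 * ll - (ll + lr + pvW (w :: rest))| := by
      rw [pvW_cons]
      rcases abs_cases (2 * (ll + PySem.Str.len w + 1) - (ll + lr + (PySem.Str.len w + 1 + pvW rest))) with ⟨h1, _⟩ | ⟨h1, _⟩ <;>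
      rcases abs_cases (2 * ll - (ll + lr + (PySem.Str.len w + 1 + pvW rest))) with ⟨h2, _⟩ | ⟨h2, _⟩ <;>
        omega
    rw [pvScan_cons, if_pos hd]
    have hshift := pvScan_shift rest (ll + lr + pvW (w :: rest)) (ll + PySem.Str.len w + 1)
      (|2 * (ll + PySem.Str.len w + 1) - (ll + lr + pvW (w :: rest))|) 0 0 1
    rw [hshift]
    have ih' := ih (by omega) hlr
    rw [show ll + PySem.Str.len w + 1 + lr + pvW rest = ll + lr + pvW (w :: rest) by
      rw [pvW_cons]; ring] at ih'
    rw [ih']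
    rw [show pvG (w :: rest) ll lr = pvG rest (ll + PySem.Str.len w + 1) lr + 1 by
      rw [pvG]; simp [hlt]]
    push_cast
    ring
  | case3 w rest ll lr hge ih =>
    have hne : (w :: rest) ≠ ([] : List String) := by simp
    have hsplit := List.dropLast_append_getLast hne
    set wl := (w :: rest).getLast hne with hwl
    set init := (w :: rest).dropLast with hinit
    have hwle : 0 ≤ PySem.Str.len wl := pvLen_nonneg wl
    have hWi : 0 ≤ pvW init := pvW_nonneg init
    obtain ⟨W, hW⟩ : ∃ W, pvW (w :: rest) = W := ⟨_, rfl⟩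
    have hWs : W = pvW init + (PySem.Str.len wl + 1) := by
      rw [← hW, ← pvW_append_singleton, hsplit]
    rw [hW]
    have hT : ll + (lr + PySem.Str.len wl + 1) + pvW init = ll + lr + W := by rw [hWs]; ring
    have ih' := ih (by omega) (by omega)
    rw [hT] at ih'
    have hbst := pvScan_best_le init (ll + lr + W) ll (|2 * ll - (ll + lr + W)|) 0 0 le_rfl
    have hp := pvScan_p init (ll + lr + W) ll (|2 * ll - (ll + lr + W)|) 0 0
    conv_lhs => rw [show (w :: rest) = init ++ [wl] from hsplit.symm]
    rw [pvScan_append_singleton]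
    simp only [pvStep]
    have hnd : ¬ (|2 * ((pvScan init (ll + lr + W) ll (|2 * ll - (ll + lr + W)|) 0 0).1
          + PySem.Str.len wl + 1) - (ll + lr + W)|
        < (pvScan init (ll + lr + W) ll (|2 * ll - (ll + lr + W)|) 0 0).2.1) := by
      rw [hp]
      have h1 : |2 * (ll + pvW init + PySem.Str.len wl + 1) - (ll + lr + W)| = ll + W - lr := by
        rw [abs_of_nonneg (by omega)]; omega
      have h2 : |2 * (ll + pvW init) - (ll + lr + W)| ≤ ll + W - lr := by
        rcases abs_cases (2 * (ll + pvW init) - (ll + lr + W)) with ⟨he, _⟩ | ⟨he, _⟩ <;> omega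
      rw [h1]
      omega
    rw [if_neg hnd]
    have hGeq : pvG (w :: rest) ll lr = pvG init ll (lr + PySem.Str.len wl + 1) := by
      conv_lhs => rw [pvG]
      rw [if_neg hge]
    rw [hGeq]
    exact ih'

theorem pvG_le_length (ws : List String) (ll lr : Int) : pvG ws ll lr ≤ ws.length := by
  induction ws, ll, lr using pvG.induct with
  | case1 ll lr => simp [pvG]
  | case2 w rest ll lr hlt ih =>
    rw [show pvG (w :: rest) ll lr = pvG rest (ll + PySem.Str.len w + 1) lr + 1 by
      rw [pvG]; simp [hlt]]
    simpa using ih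
  | case3 w rest ll lr hge ih =>
    rw [show pvG (w :: rest) ll lr
        = pvG (w :: rest).dropLast ll (lr + PySem.Str.len ((w :: rest).getLast (by simp)) + 1) by
      conv_lhs => rw [pvG]
      rw [if_neg hge]]
    calc pvG (w :: rest).dropLast ll _ ≤ (w :: rest).dropLast.length := ih
    _ ≤ (w :: rest).length := by simp

theorem pvLoopA_eq (ws l r : List String) (ll lr : Int) :
    pvLoopA ws l r ll lr =
      (l ++ ws.take (pvG ws ll lr), r ++ (ws.drop (pvG ws ll lr)).reverse) := by
  induction ws, ll, lr using pvG.induct generalizing l r with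
  | case1 ll lr => simp [pvLoopA, pvG]
  | case2 w rest ll lr hlt ih =>
    rw [show pvLoopA (w :: rest) l r ll lr
        = pvLoopA rest (l ++ [w]) r (ll + PySem.Str.len w + 1) lr by rw [pvLoopA]; simp [hlt]]
    rw [show pvG (w :: rest) ll lr = pvG rest (ll + PySem.Str.len w + 1) lr + 1 by
      rw [pvG]; simp [hlt]]
    rw [ih]
    simp
  | case3 w rest ll lr hge ih =>
    have hne : (w :: rest) ≠ ([] : List String) := by simp
    have hsplit := List.dropLast_append_getLast hne
    have hle := pvG_le_length (w :: rest).dropLast ll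
      (lr + PySem.Str.len ((w :: rest).getLast (by simp)) + 1)
    rw [show pvLoopA (w :: rest) l r ll lr
        = pvLoopA (w :: rest).dropLast l (r ++ [(w :: rest).getLast (by simp)]) ll
            (lr + PySem.Str.len ((w :: rest).getLast (by simp)) + 1) by
      conv_lhs => rw [pvLoopA]
      rw [if_neg hge]]
    rw [show pvG (w :: rest) ll lr
        = pvG (w :: rest).dropLast ll (lr + PySem.Str.len ((w :: rest).getLast (by simp)) + 1) by
      conv_lhs => rw [pvG]
      rw [if_neg hge]]
    rw [ih, Prod.mk.injEq]
    set g := pvG (w :: rest).dropLast ll (lr + PySem.Str.len ((w :: rest).getLast (by simp)) + 1) with hg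
    constructor
    · conv_rhs => rw [← hsplit]
      rw [List.take_append_of_le_length hle]
    · conv_rhs => rw [← hsplit]
      rw [List.drop_append_of_le_length hle]
      simp

-- ===== VERDICT (by name: the statement is the Claim_ definition above) =====
theorem splitLabel_spec : Claim_equal_splitLabel := by
  intro s _
  simp only [Spec_splitLabel, splitLabel, splitLabel_alt]
  rw [pvLoopA_eq]
  rw [show ((PySem.Str.split₀ s).map (fun w => PySem.Str.len w + 1)).sum
      = pvW (PySem.Str.split₀ s) from rfl]
  rw [pvFoldB_eq_scan (PySem.Str.split₀ s) (pvW (PySem.Str.split₀ s)) 0 0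
      (|(-(pvW (PySem.Str.split₀ s)))|) 0]
  have hmain := pvMain (PySem.Str.split₀ s) 0 0 le_rfl le_rfl
  norm_num at hmain
  rw [show (|(-(pvW (PySem.Str.split₀ s)))| : Int) = |pvW (PySem.Str.split₀ s)| from abs_neg _]
  rw [hmain]
  rw [PySem.List.slice_to_natCast, PySem.List.slice_from_natCast]
  simp
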